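-- pv_equiv track=rewrite | github.com/B-Leucht/open-atlas | backend/app.py | detect_coordinate_columns
-- ===== SOURCE A (Python) =====
-- from typing import List, Dict, Any, Optional
--
-- def detect_coordinate_columns(headers: List[str]) -> Dict[str, Optional[str]]:
--     """Detect latitude and longitude columns in CSV headers"""
--     headers_lower = [h.lower().strip() for h in headers]
--
--     lat_patterns = ['lat', 'latitude', 'breitengrad', 'y', 'northing']
--     lon_patterns = ['lon', 'lng', 'longitude', 'laengengrad', 'längengrad', 'x', 'easting']
--
--     lat_col = None
--     lon_col = None
--
--     # Try to find exact matches first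
--     for i, h in enumerate(headers_lower):
--         if not lat_col:
--             for pattern in lat_patterns:
--                 if pattern == h or h.startswith(pattern):
--                     lat_col = headers[i]
--                     break
--
--         if not lon_col:
--             for pattern in lon_patterns:
--                 if pattern == h or h.startswith(pattern):
--                     lon_col = headers[i]
--                     break
--
--     # Try partial matches if exact matches not found
--     if not lat_col or not lon_col:
--         for i, h in enumerate(headers_lower):
--             if not lat_col:
--                 for pattern in lat_patterns:
--                     if pattern in h:
--                         lat_col = headers[i]
--                         break
--
--             if not lon_col:
--                 for pattern in lon_patterns:
--                     if pattern in h: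
--                         lon_col = headers[i]
--                         break
--
--     return {'lat': lat_col, 'lon': lon_col}
-- ===== SOURCE B (Python) =====
-- from typing import List, Dict, Optional
--
-- def detect_coordinate_columns(headers: List[str]) -> Dict[str, Optional[str]]:
--     """Single pass: record the first starts-with and first substring match index
--     for each of lat/lon, then prefer the starts-with index."""
--     lat_patterns = ['lat', 'latitude', 'breitengrad', 'y', 'northing']
--     lon_patterns = ['lon', 'lng', 'longitude', 'laengengrad', 'längengrad', 'x', 'easting']
--
--     ss_lat = sub_lat = ss_lon = sub_lon = None
--     for i, h in enumerate(headers):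
--         hl = h.lower().strip()
--         if ss_lat is None and any(hl.startswith(p) for p in lat_patterns):
--             ss_lat = i
--         if sub_lat is None and any(p in hl for p in lat_patterns):
--             sub_lat = i
--         if ss_lon is None and any(hl.startswith(p) for p in lon_patterns):
--             ss_lon = i
--         if sub_lon is None and any(p in hl for p in lon_patterns):
--             sub_lon = i
--
--     li = ss_lat if ss_lat is not None else sub_lat
--     lo = ss_lon if ss_lon is not None else sub_lon
--     return {'lat': headers[li] if li is not None else None,
--             'lon': headers[lo] if lo is not None else None}
-- ===== Notes on version B (the rewrite author's own statement) =====
-- stated objective: simpler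
-- what changed: A's two sequential guarded scans (exact/startswith phase, then a substring phase rerun over all headers) are replaced by a single pass that records four first-match indices (startswith and substring, for lat and lon) and resolves startswith-over-substring preference after the loop.
import Mathlib
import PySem

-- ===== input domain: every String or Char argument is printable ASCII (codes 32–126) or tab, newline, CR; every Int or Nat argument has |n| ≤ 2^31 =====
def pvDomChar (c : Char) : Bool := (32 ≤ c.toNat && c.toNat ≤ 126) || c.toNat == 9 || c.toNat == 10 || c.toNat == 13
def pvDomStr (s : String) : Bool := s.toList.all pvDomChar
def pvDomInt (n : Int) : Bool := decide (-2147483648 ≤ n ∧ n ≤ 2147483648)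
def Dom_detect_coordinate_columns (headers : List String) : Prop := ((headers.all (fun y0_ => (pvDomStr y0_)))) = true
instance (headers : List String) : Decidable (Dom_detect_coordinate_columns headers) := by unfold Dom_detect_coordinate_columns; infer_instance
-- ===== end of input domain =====

-- B replaces A's two sequential two-phase scans by a single pass that records four
-- first-match indices (starts-with / substring, for lat and lon) and resolves them
-- afterwards; objective: simpler (one loop instead of two guarded ones).

-- ===== PORT A =====
-- Python truthiness of `lat_col` (a str-or-None): None and "" are falsy.
def pvTruthy : Option String → Bool
  | none => false
  | some s => !(s == "")

-- Literal port of A.  `headers[i]` with i from enumerate is always in range, so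
-- PySem.List.pyGetD with an unreachable default "" is exact here.
def detect_coordinate_columns (headers : List String) : List (String × Option String) :=
  let headers_lower := headers.map (fun h => PySem.Str.strip (PySem.Str.lower h))
  let lat_patterns : List String := ["lat", "latitude", "breitengrad", "y", "northing"]
  let lon_patterns : List String := ["lon", "lng", "longitude", "laengengrad", "längengrad", "x", "easting"]
  -- first loop: exact matches (pattern == h or h.startswith(pattern))
  let s1 := (PySem.List.enumerate headers_lower).foldl (fun s ih =>
      (if !(pvTruthy s.1) then
         (if lat_patterns.any (fun p => p == ih.2 || PySem.Str.startswith ih.2 p)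
          then some (PySem.List.pyGetD headers ih.1 "") else s.1)
       else s.1,
       if !(pvTruthy s.2) then
         (if lon_patterns.any (fun p => p == ih.2 || PySem.Str.startswith ih.2 p)
          then some (PySem.List.pyGetD headers ih.1 "") else s.2)
       else s.2)) ((none : Option String), (none : Option String))
  -- second loop: partial (substring) matches, only if something is still missing
  let s2 := if !(pvTruthy s1.1) || !(pvTruthy s1.2) then
      (PySem.List.enumerate headers_lower).foldl (fun s ih =>
        (if !(pvTruthy s.1) then
           (if lat_patterns.any (fun p => PySem.Str.isIn p ih.2)
            then some (PySem.List.pyGetD headers ih.1 "") else s.1)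
         else s.1,
         if !(pvTruthy s.2) then
           (if lon_patterns.any (fun p => PySem.Str.isIn p ih.2)
            then some (PySem.List.pyGetD headers ih.1 "") else s.2)
         else s.2)) s1
    else s1
  [("lat", s2.1), ("lon", s2.2)]

-- ===== PORT B =====
-- Literal port of B: one pass tracking four first-match indices.
def detect_coordinate_columns_alt (headers : List String) : List (String × Option String) :=
  let lat_patterns : List String := ["lat", "latitude", "breitengrad", "y", "northing"]
  let lon_patterns : List String := ["lon", "lng", "longitude", "laengengrad", "längengrad", "x", "easting"]
  let st := (PySem.List.enumerate headers).foldl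
    (fun (s : Option Int × Option Int × Option Int × Option Int) ih =>
      let hl := PySem.Str.strip (PySem.Str.lower ih.2)
      (if s.1.isNone && lat_patterns.any (fun p => PySem.Str.startswith hl p) then some ih.1 else s.1,
       if s.2.1.isNone && lat_patterns.any (fun p => PySem.Str.isIn p hl) then some ih.1 else s.2.1,
       if s.2.2.1.isNone && lon_patterns.any (fun p => PySem.Str.startswith hl p) then some ih.1 else s.2.2.1,
       if s.2.2.2.isNone && lon_patterns.any (fun p => PySem.Str.isIn p hl) then some ih.1 else s.2.2.2))
    (none, none, none, none)
  let li := if st.1.isSome then st.1 else st.2.1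
  let lo := if st.2.2.1.isSome then st.2.2.1 else st.2.2.2
  [("lat", li.map (fun i => PySem.List.pyGetD headers i "")),
   ("lon", lo.map (fun i => PySem.List.pyGetD headers i ""))]

-- ===== PRECONDITION & SPEC =====
def Spec_detect_coordinate_columns (headers : List String) (out : List (String × Option String)) : Prop := out = detect_coordinate_columns_alt headers
instance (headers : List String) (out : List (String × Option String)) : Decidable (Spec_detect_coordinate_columns headers out) := by unfold Spec_detect_coordinate_columns; infer_instance

-- ===== CLAIM (what is proved, stated in full; the proofs are below) =====
def Claim_equal_detect_coordinate_columns : Prop := ∀ (headers : List String), Dom_detect_coordinate_columns headers → Spec_detect_coordinate_columns headers (detect_coordinate_columns headers)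

-- ===== LEMMAS AND PROOFS =====

-- proof-side vocabulary
def pvNorm (h : String) : String := PySem.Str.strip (PySem.Str.lower h)
def pvLatPats : List String := ["lat", "latitude", "breitengrad", "y", "northing"]
def pvLonPats : List String := ["lon", "lng", "longitude", "laengengrad", "längengrad", "x", "easting"]
def pvQS (pats : List String) (h : String) : Bool := pats.any (fun p => PySem.Str.startswith (pvNorm h) p)
def pvQI (pats : List String) (h : String) : Bool := pats.any (fun p => PySem.Str.isIn p (pvNorm h))

-- generic slot steps
def pvStepV (q : String → Bool) (headers : List String) (s : Option String) (ih : Int × String) : Option String :=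
  if !(pvTruthy s) then (if q ih.2 then some (PySem.List.pyGetD headers ih.1 "") else s) else s
def pvStepN (q : String → Bool) (s : Option Int) (ih : Int × String) : Option Int :=
  if s.isNone && q ih.2 then some ih.1 else s

theorem pvEqOrStart (pats : List String) (h : String) :
    pats.any (fun p => p == h || PySem.Str.startswith h p) = pats.any (fun p => PySem.Str.startswith h p) := by
  induction pats with
  | nil => rfl
  | cons p t ih =>
    simp only [List.any_cons, ih]
    by_cases hp : p = h
    · subst hp; simp [PySem.Chars.startswith_iff]
    · have hne : (p == h) = false := beq_eq_false_iff_ne.mpr hp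
      simp [hne]

theorem pvFoldl_pair_split {α β γ : Type} (f : β → α → β) (g : γ → α → γ) :
    ∀ (l : List α) (a : β) (b : γ),
      l.foldl (fun s x => (f s.1 x, g s.2 x)) (a, b) = (l.foldl f a, l.foldl g b) := by
  intro l
  induction l with
  | nil => intro a b; rfl
  | cons x t ih => intro a b; simpa using ih (f a x) (g b x)

theorem pvFoldl_quad_split {α β₁ β₂ β₃ β₄ : Type}
    (f₁ : β₁ → α → β₁) (f₂ : β₂ → α → β₂) (f₃ : β₃ → α → β₃) (f₄ : β₄ → α → β₄) :
    ∀ (l : List α) (a : β₁) (b : β₂) (c : β₃) (d : β₄),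
      l.foldl (fun s x => (f₁ s.1 x, f₂ s.2.1 x, f₃ s.2.2.1 x, f₄ s.2.2.2 x)) (a, b, c, d)
        = (l.foldl f₁ a, l.foldl f₂ b, l.foldl f₃ c, l.foldl f₄ d) := by
  intro l
  induction l with
  | nil => intro a b c d; rfl
  | cons x t ih => intro a b c d; simpa using ih (f₁ a x) (f₂ b x) (f₃ c x) (f₄ d x)

theorem pvFoldN_some (q : String → Bool) (v : Int) :
    ∀ (l : List (Int × String)), l.foldl (pvStepN q) (some v) = some v := by
  intro l; induction l with
  | nil => rfl
  | cons x t ih => simpa [pvStepN] using ih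

theorem pvFoldN_none (q : String → Bool) :
    ∀ (l : List (Int × String)),
      l.foldl (pvStepN q) none = (l.find? (fun ih => q ih.2)).map (·.1) := by
  intro l; induction l with
  | nil => rfl
  | cons x t ih =>
    by_cases hx : q x.2
    · simp [pvStepN, hx, pvFoldN_some]
    · simp [pvStepN, hx, ih]

theorem pvFoldV_some (q : String → Bool) (headers : List String) (v : String) (hv : v ≠ "") :
    ∀ (l : List (Int × String)), l.foldl (pvStepV q headers) (some v) = some v := by
  intro l; induction l with
  | nil => rfl
  | cons x t ih =>
    have : pvTruthy (some v) = true := by simp [pvTruthy, hv]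
    simpa [pvStepV, this] using ih

theorem pvFoldV_none (q : String → Bool) (headers : List String) (hq : q "" = false)
    (l : List (Int × String)) (hl : ∀ ih ∈ l, PySem.List.pyGetD headers ih.1 "" = ih.2) :
    l.foldl (pvStepV q headers) none = (l.find? (fun ih => q ih.2)).map (·.2) := by
  induction l with
  | nil => rfl
  | cons x t ih =>
    by_cases hx : q x.2
    · have hxv : PySem.List.pyGetD headers x.1 "" = x.2 := hl x (by simp)
      have hne : x.2 ≠ "" := by intro h; rw [h] at hx; rw [hq] at hx; exact Bool.false_ne_true hx
      simp [pvStepV, pvTruthy, hx, hxv, pvFoldV_some q headers x.2 hne]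
    · have := ih (fun p hp => hl p (List.mem_cons_of_mem _ hp))
      simp [pvStepV, hx, this]

theorem pvMem_enumerate_getD (headers : List String) (ih : Int × String)
    (h : ih ∈ PySem.List.enumerate headers 0) : PySem.List.pyGetD headers ih.1 "" = ih.2 := by
  rw [PySem.List.mem_enumerate_iff] at h
  obtain ⟨k, hk, rfl⟩ := h
  simp [PySem.List.pyGetD_natCast, List.getD_eq_getElem?_getD, hk]

-- the common canonical description of one slot
def pvCanon (q : String → Bool) (headers : List String) : Option (Int × String) :=
  (PySem.List.enumerate headers 0).find? (fun ih => q ih.2)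

theorem pvCanon_mem (q : String → Bool) (headers : List String) (ih : Int × String)
    (h : pvCanon q headers = some ih) : PySem.List.pyGetD headers ih.1 "" = ih.2 :=
  pvMem_enumerate_getD headers ih (List.mem_of_find?_eq_some h)

theorem pvCanon_holds (q : String → Bool) (headers : List String) (ih : Int × String)
    (h : pvCanon q headers = some ih) : q ih.2 = true := by
  have := List.find?_eq_some_iff_append.mp h
  exact this.1


def pvResolve (pats : List String) (headers : List String) : Option String :=
  ((pvCanon (pvQS pats) headers).map (·.2)).or ((pvCanon (pvQI pats) headers).map (·.2))

theorem pvEnum_map_norm (headers : List String) :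
    PySem.List.enumerate (headers.map pvNorm) 0
      = (PySem.List.enumerate headers 0).map (fun ih => (ih.1, pvNorm ih.2)) := by
  generalize (0 : Int) = s
  induction headers generalizing s with
  | nil => rfl
  | cons x t ih => simp [PySem.List.enumerate_cons, ih]

theorem pvCanon_ne_empty (q : String → Bool) (hq : q "" = false) (headers : List String)
    (ih : Int × String) (h : pvCanon q headers = some ih) : ih.2 ≠ "" := by
  intro he
  have := pvCanon_holds q headers ih h
  rw [he, hq] at this
  exact Bool.false_ne_true this

theorem pvA_closed (headers : List String) :
    detect_coordinate_columns headers
      = [("lat", pvResolve pvLatPats headers), ("lon", pvResolve pvLonPats headers)] := by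
  have hstep1 : (PySem.List.enumerate (headers.map (fun h => PySem.Str.strip (PySem.Str.lower h)))).foldl (fun s ih =>
      (if !(pvTruthy s.1) then
         (if pvLatPats.any (fun p => p == ih.2 || PySem.Str.startswith ih.2 p)
          then some (PySem.List.pyGetD headers ih.1 "") else s.1)
       else s.1,
       if !(pvTruthy s.2) then
         (if pvLonPats.any (fun p => p == ih.2 || PySem.Str.startswith ih.2 p)
          then some (PySem.List.pyGetD headers ih.1 "") else s.2)
       else s.2)) ((none : Option String), (none : Option String))
      = ((pvCanon (pvQS pvLatPats) headers).map (·.2), (pvCanon (pvQS pvLonPats) headers).map (·.2)) := by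
    have hcg := PySem.List.foldl_congr_mem
      (PySem.List.enumerate (headers.map (fun h => PySem.Str.strip (PySem.Str.lower h))))
      (fun (s : Option String × Option String) (ih : Int × String) =>
        (if !(pvTruthy s.1) then
           (if pvLatPats.any (fun p => p == ih.2 || PySem.Str.startswith ih.2 p)
            then some (PySem.List.pyGetD headers ih.1 "") else s.1)
         else s.1,
         if !(pvTruthy s.2) then
           (if pvLonPats.any (fun p => p == ih.2 || PySem.Str.startswith ih.2 p)
            then some (PySem.List.pyGetD headers ih.1 "") else s.2)
         else s.2))
      (fun (s : Option String × Option String) (ih : Int × String) =>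
        (if !(pvTruthy s.1) then
           (if pvLatPats.any (fun p => PySem.Str.startswith ih.2 p)
            then some (PySem.List.pyGetD headers ih.1 "") else s.1)
         else s.1,
         if !(pvTruthy s.2) then
           (if pvLonPats.any (fun p => PySem.Str.startswith ih.2 p)
            then some (PySem.List.pyGetD headers ih.1 "") else s.2)
         else s.2))
      ((none : Option String), (none : Option String))
      (by intro acc x hx; simp only [pvEqOrStart])
    rw [hcg, show (headers.map (fun h => PySem.Str.strip (PySem.Str.lower h))) = headers.map pvNorm from rfl,
        pvEnum_map_norm, List.foldl_map]
    refine Eq.trans (pvFoldl_pair_split (pvStepV (pvQS pvLatPats) headers) (pvStepV (pvQS pvLonPats) headers) _ none none) ?_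
    rw [pvFoldV_none _ _ (by decide) _ (fun ih h => pvMem_enumerate_getD headers ih h),
        pvFoldV_none _ _ (by decide) _ (fun ih h => pvMem_enumerate_getD headers ih h)]
    rfl
  have h2 : ∀ (a b : Option String), (∀ v, a = some v → v ≠ "") → (∀ v, b = some v → v ≠ "") →
      (PySem.List.enumerate (headers.map (fun h => PySem.Str.strip (PySem.Str.lower h)))).foldl (fun s ih =>
        (if !(pvTruthy s.1) then
           (if pvLatPats.any (fun p => PySem.Str.isIn p ih.2)
            then some (PySem.List.pyGetD headers ih.1 "") else s.1)
         else s.1,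
         if !(pvTruthy s.2) then
           (if pvLonPats.any (fun p => PySem.Str.isIn p ih.2)
            then some (PySem.List.pyGetD headers ih.1 "") else s.2)
         else s.2)) (a, b)
      = (a.or ((pvCanon (pvQI pvLatPats) headers).map (·.2)),
         b.or ((pvCanon (pvQI pvLonPats) headers).map (·.2))) := by
    intro a b ha hb
    rw [show (headers.map (fun h => PySem.Str.strip (PySem.Str.lower h))) = headers.map pvNorm from rfl,
        pvEnum_map_norm, List.foldl_map]
    refine Eq.trans (pvFoldl_pair_split (pvStepV (pvQI pvLatPats) headers) (pvStepV (pvQI pvLonPats) headers) _ a b) ?_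
    have hlat : (PySem.List.enumerate headers 0).foldl (pvStepV (pvQI pvLatPats) headers) a
        = a.or ((pvCanon (pvQI pvLatPats) headers).map (·.2)) := by
      cases a with
      | none =>
        rw [pvFoldV_none _ _ (by decide) _ (fun ih h => pvMem_enumerate_getD headers ih h)]
        rfl
      | some v => rw [pvFoldV_some _ _ v (ha v rfl)]; rfl
    have hlon : (PySem.List.enumerate headers 0).foldl (pvStepV (pvQI pvLonPats) headers) b
        = b.or ((pvCanon (pvQI pvLonPats) headers).map (·.2)) := by
      cases b with
      | none =>
        rw [pvFoldV_none _ _ (by decide) _ (fun ih h => pvMem_enumerate_getD headers ih h)]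
        rfl
      | some v => rw [pvFoldV_some _ _ v (hb v rfl)]; rfl
    rw [hlat, hlon]
  unfold detect_coordinate_columns
  show (fun s1 : Option String × Option String =>
      (fun s2 : Option String × Option String => [("lat", s2.1), ("lon", s2.2)])
        (if !(pvTruthy s1.1) || !(pvTruthy s1.2) then
          (PySem.List.enumerate (headers.map (fun h => PySem.Str.strip (PySem.Str.lower h)))).foldl (fun s ih =>
            (if !(pvTruthy s.1) then
               (if pvLatPats.any (fun p => PySem.Str.isIn p ih.2)
                then some (PySem.List.pyGetD headers ih.1 "") else s.1)
             else s.1,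
             if !(pvTruthy s.2) then
               (if pvLonPats.any (fun p => PySem.Str.isIn p ih.2)
                then some (PySem.List.pyGetD headers ih.1 "") else s.2)
             else s.2)) s1
         else s1))
      ((PySem.List.enumerate (headers.map (fun h => PySem.Str.strip (PySem.Str.lower h)))).foldl (fun s ih =>
        (if !(pvTruthy s.1) then
           (if pvLatPats.any (fun p => p == ih.2 || PySem.Str.startswith ih.2 p)
            then some (PySem.List.pyGetD headers ih.1 "") else s.1)
         else s.1,
         if !(pvTruthy s.2) then
           (if pvLonPats.any (fun p => p == ih.2 || PySem.Str.startswith ih.2 p)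
            then some (PySem.List.pyGetD headers ih.1 "") else s.2)
         else s.2)) ((none : Option String), (none : Option String)))
      = [("lat", pvResolve pvLatPats headers), ("lon", pvResolve pvLonPats headers)]
  rw [hstep1]
  simp only []
  by_cases hc : (!(pvTruthy ((pvCanon (pvQS pvLatPats) headers).map (·.2)))
      || !(pvTruthy ((pvCanon (pvQS pvLonPats) headers).map (·.2)))) = true
  · rw [if_pos hc, h2 _ _
      (fun v hv => by
        cases hS : pvCanon (pvQS pvLatPats) headers with
        | none => rw [hS] at hv; exact absurd hv (by simp)
        | some ih =>
          rw [hS] at hv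
          have : ih.2 = v := by simpa using hv
          exact this ▸ pvCanon_ne_empty _ (by decide) headers ih hS)
      (fun v hv => by
        cases hS : pvCanon (pvQS pvLonPats) headers with
        | none => rw [hS] at hv; exact absurd hv (by simp)
        | some ih =>
          rw [hS] at hv
          have : ih.2 = v := by simpa using hv
          exact this ▸ pvCanon_ne_empty _ (by decide) headers ih hS)]
    rfl
  · rw [if_neg hc]
    have hc' := hc
    simp only [Bool.or_eq_true, Bool.not_eq_true', not_or] at hc'
    obtain ⟨h1, h2'⟩ := hc'
    cases hS1 : pvCanon (pvQS pvLatPats) headers with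
    | none => rw [hS1] at h1; exact absurd h1 (by simp [pvTruthy])
    | some ih1 =>
      cases hS2 : pvCanon (pvQS pvLonPats) headers with
      | none => rw [hS2] at h2'; exact absurd h2' (by simp [pvTruthy])
      | some ih2 =>
        simp [pvResolve, hS1, hS2, Option.or]

theorem pvB_closed (headers : List String) :
    detect_coordinate_columns_alt headers
      = [("lat", (((pvCanon (pvQS pvLatPats) headers).map (·.1)).or
              ((pvCanon (pvQI pvLatPats) headers).map (·.1))).map
              (fun i => PySem.List.pyGetD headers i "")),
         ("lon", (((pvCanon (pvQS pvLonPats) headers).map (·.1)).or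
              ((pvCanon (pvQI pvLonPats) headers).map (·.1))).map
              (fun i => PySem.List.pyGetD headers i ""))] := by
  have hquad : (PySem.List.enumerate headers).foldl
      (fun (s : Option Int × Option Int × Option Int × Option Int) ih =>
        let hl := PySem.Str.strip (PySem.Str.lower ih.2)
        (if s.1.isNone && pvLatPats.any (fun p => PySem.Str.startswith hl p) then some ih.1 else s.1,
         if s.2.1.isNone && pvLatPats.any (fun p => PySem.Str.isIn p hl) then some ih.1 else s.2.1,
         if s.2.2.1.isNone && pvLonPats.any (fun p => PySem.Str.startswith hl p) then some ih.1 else s.2.2.1,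
         if s.2.2.2.isNone && pvLonPats.any (fun p => PySem.Str.isIn p hl) then some ih.1 else s.2.2.2))
      (none, none, none, none)
      = ((pvCanon (pvQS pvLatPats) headers).map (·.1),
         (pvCanon (pvQI pvLatPats) headers).map (·.1),
         (pvCanon (pvQS pvLonPats) headers).map (·.1),
         (pvCanon (pvQI pvLonPats) headers).map (·.1)) := by
    refine Eq.trans (pvFoldl_quad_split (pvStepN (pvQS pvLatPats)) (pvStepN (pvQI pvLatPats))
      (pvStepN (pvQS pvLonPats)) (pvStepN (pvQI pvLonPats)) _ none none none none) ?_
    rw [pvFoldN_none, pvFoldN_none, pvFoldN_none, pvFoldN_none]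
    rfl
  unfold detect_coordinate_columns_alt
  show (fun st : Option Int × Option Int × Option Int × Option Int =>
      [("lat", (if st.1.isSome then st.1 else st.2.1).map (fun i => PySem.List.pyGetD headers i "")),
       ("lon", (if st.2.2.1.isSome then st.2.2.1 else st.2.2.2).map (fun i => PySem.List.pyGetD headers i ""))])
      ((PySem.List.enumerate headers).foldl
        (fun (s : Option Int × Option Int × Option Int × Option Int) ih =>
          let hl := PySem.Str.strip (PySem.Str.lower ih.2)
          (if s.1.isNone && pvLatPats.any (fun p => PySem.Str.startswith hl p) then some ih.1 else s.1,
           if s.2.1.isNone && pvLatPats.any (fun p => PySem.Str.isIn p hl) then some ih.1 else s.2.1,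
           if s.2.2.1.isNone && pvLonPats.any (fun p => PySem.Str.startswith hl p) then some ih.1 else s.2.2.1,
           if s.2.2.2.isNone && pvLonPats.any (fun p => PySem.Str.isIn p hl) then some ih.1 else s.2.2.2))
        (none, none, none, none))
      = _
  rw [hquad]
  cases pvCanon (pvQS pvLatPats) headers <;> cases pvCanon (pvQI pvLatPats) headers <;>
    cases pvCanon (pvQS pvLonPats) headers <;> cases pvCanon (pvQI pvLonPats) headers <;>
    simp [Option.or]

theorem pvResolve_eq (pats headers : List String) :
    pvResolve pats headers
      = (((pvCanon (pvQS pats) headers).map (·.1)).or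
          ((pvCanon (pvQI pats) headers).map (·.1))).map
          (fun i => PySem.List.pyGetD headers i "") := by
  unfold pvResolve
  cases hS : pvCanon (pvQS pats) headers with
  | some ih => simp [Option.or, pvCanon_mem _ _ _ hS]
  | none =>
    cases hI : pvCanon (pvQI pats) headers with
    | some ih => simp [Option.or, pvCanon_mem _ _ _ hI]
    | none => simp [Option.or]

-- ===== VERDICT (by name: the statement is the Claim_ definition above) =====
theorem detect_coordinate_columns_spec : Claim_equal_detect_coordinate_columns := by
  intro headers _
  unfold Spec_detect_coordinate_columns
  rw [pvA_closed, pvB_closed, pvResolve_eq, pvResolve_eq]
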